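-- pv_equiv track=rewrite | github.com/microsoft/agent-lightning | analyze_mismatch.py | find_all_diff_segments
-- ===== SOURCE A (Python) =====
-- def find_all_diff_segments(a, b):
--     i = j = 0
--     n1, n2 = len(a), len(b)
--     diffs = []
--     curr_a, curr_b = [], []
--
--     while i < n1 or j < n2:
--         # 如果两个列表都没结束并且元素相同 → diff 结束（如果在记录）
--         if i < n1 and j < n2 and a[i] == b[j]:
--             if curr_a or curr_b:
--                 diffs.append((curr_a, curr_b))
--                 curr_a, curr_b = [], []
--             i += 1
--             j += 1
--             continue
--
--         # 下面是元素不同的情况，需要归类到 diff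
--         if i < n1:
--             curr_a.append(a[i])
--         if j < n2:
--             curr_b.append(b[j])
--         i += 1 if i < n1 else 0
--         j += 1 if j < n2 else 0
--
--     # 结束时如果还有 diff 段
--     if curr_a or curr_b:
--         diffs.append((curr_a, curr_b))
--
--     return diffs
-- ===== SOURCE B (Python) =====
-- def find_all_diff_segments(a, b):
--     n1, n2 = len(a), len(b)
--     n = max(n1, n2)
--     segments = []
--     k = 0
--     while k < n:
--         if k < n1 and k < n2 and a[k] == b[k]:
--             k += 1
--             continue
--         start = k
--         while k < n and not (k < n1 and k < n2 and a[k] == b[k]):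
--             k += 1
--         segments.append((a[start:min(k, n1)], b[start:min(k, n2)]))
--     return segments
-- ===== Notes on version B (the rewrite author's own statement) =====
-- stated objective: alternative
-- what changed: Replaces A's dual-pointer loop with incremental accumulator lists flushed on each match by a single-index scan that detects each maximal non-matching run's boundaries and emits the run via list slicing.
import Mathlib
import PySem

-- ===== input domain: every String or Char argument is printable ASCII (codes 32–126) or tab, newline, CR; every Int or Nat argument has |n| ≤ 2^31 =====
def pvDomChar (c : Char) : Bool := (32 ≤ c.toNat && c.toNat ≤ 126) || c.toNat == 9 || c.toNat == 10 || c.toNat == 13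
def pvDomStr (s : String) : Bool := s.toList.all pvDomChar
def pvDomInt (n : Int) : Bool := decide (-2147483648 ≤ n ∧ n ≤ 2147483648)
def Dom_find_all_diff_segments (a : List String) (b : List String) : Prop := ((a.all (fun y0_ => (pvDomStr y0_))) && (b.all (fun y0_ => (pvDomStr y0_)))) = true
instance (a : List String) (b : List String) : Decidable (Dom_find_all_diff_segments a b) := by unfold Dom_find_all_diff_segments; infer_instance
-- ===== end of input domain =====

-- B replaces A's dual-pointer accumulate-and-flush loop with a run-boundary scan plus slicing (alternative decomposition, same cost).

-- ===== PORT A =====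
-- literal transliteration of A's while loop: pointers i, j, accumulators curr_a/curr_b flushed on match
def pvALoop (a b : List String) (i j : Nat) (diffs : List (List String × List String))
    (ca cb : List String) : List (List String × List String) :=
  if _hg : i < a.length ∨ j < b.length then
    if _hm : i < a.length ∧ j < b.length ∧ a.getD i "" = b.getD j "" then
      pvALoop a b (i+1) (j+1) (if ca ≠ [] ∨ cb ≠ [] then diffs ++ [(ca, cb)] else diffs) [] []
    else
      pvALoop a b (if i < a.length then i+1 else i) (if j < b.length then j+1 else j) diffs
        (if i < a.length then ca ++ [a.getD i ""] else ca)
        (if j < b.length then cb ++ [b.getD j ""] else cb)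
  else
    if ca ≠ [] ∨ cb ≠ [] then diffs ++ [(ca, cb)] else diffs
termination_by (a.length - i) + (b.length - j)
decreasing_by
  · omega
  · split <;> split <;> omega

def find_all_diff_segments (a : List String) (b : List String) : List (List String × List String) :=
  pvALoop a b 0 0 [] [] []

-- ===== PORT B =====
-- B's inner while loop: advance k to the end of the maximal non-matching run
def pvRunEnd (a b : List String) (k : Nat) : Nat :=
  if h : k < max a.length b.length ∧ ¬(k < a.length ∧ k < b.length ∧ a.getD k "" = b.getD k "") then
    pvRunEnd a b (k+1)
  else k
termination_by max a.length b.length - k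

-- ≤ fact used only for pvBLoop's termination (port cites it in decreasing_by)
theorem pvRunEnd_ge (a b : List String) (k : Nat) : k ≤ pvRunEnd a b k := by
  fun_induction pvRunEnd a b k with
  | case1 k h ih => omega
  | case2 k h => omega

-- B's outer while loop: skip matches, else emit the run [k, runEnd) by slicing
def pvBLoop (a b : List String) (k : Nat) (out : List (List String × List String)) :
    List (List String × List String) :=
  if _hg : k < max a.length b.length then
    if hm : k < a.length ∧ k < b.length ∧ a.getD k "" = b.getD k "" then
      pvBLoop a b (k+1) out
    else
      pvBLoop a b (pvRunEnd a b k)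
        (out ++ [((a.drop k).take (min (pvRunEnd a b k) a.length - k),
                  (b.drop k).take (min (pvRunEnd a b k) b.length - k))])
  else out
termination_by max a.length b.length - k
decreasing_by
  · omega
  · have h1 : pvRunEnd a b k = pvRunEnd a b (k+1) := by
      rw [pvRunEnd]; rw [dif_pos ⟨_hg, hm⟩]
    have h2 := pvRunEnd_ge a b (k+1)
    omega

def find_all_diff_segments_alt (a : List String) (b : List String) : List (List String × List String) :=
  pvBLoop a b 0 []

-- ===== PRECONDITION & SPEC =====
def Spec_find_all_diff_segments (a : List String) (b : List String) (out : List (List String × List String)) : Prop := out = find_all_diff_segments_alt a b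
instance (a : List String) (b : List String) (out : List (List String × List String)) : Decidable (Spec_find_all_diff_segments a b out) := by unfold Spec_find_all_diff_segments; infer_instance

-- ===== CLAIM (what is proved, stated in full; the proofs are below) =====
def Claim_equal_find_all_diff_segments : Prop := ∀ (a : List String) (b : List String), Dom_find_all_diff_segments a b → Spec_find_all_diff_segments a b (find_all_diff_segments a b)

-- ===== LEMMAS AND PROOFS =====

theorem pvRunEnd_step (a b : List String) (k : Nat)
    (hg : k < max a.length b.length)
    (hm : ¬(k < a.length ∧ k < b.length ∧ a.getD k "" = b.getD k "")) :
    pvRunEnd a b k = pvRunEnd a b (k+1) := by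
  rw [pvRunEnd]; rw [dif_pos ⟨hg, hm⟩]

theorem pvRunEnd_le (a b : List String) (k : Nat) (h : k ≤ max a.length b.length) :
    pvRunEnd a b k ≤ max a.length b.length := by
  fun_induction pvRunEnd a b k with
  | case1 k h' ih => exact ih (by omega)
  | case2 k h' => omega

theorem pvRunEnd_stop (a b : List String) (k : Nat) :
    pvRunEnd a b k < max a.length b.length →
    (pvRunEnd a b k < a.length ∧ pvRunEnd a b k < b.length ∧
      a.getD (pvRunEnd a b k) "" = b.getD (pvRunEnd a b k) "") := by
  fun_induction pvRunEnd a b k with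
  | case1 k h' ih => exact ih
  | case2 k h' =>
    intro hk
    by_contra hc
    exact h' ⟨hk, hc⟩

-- one non-matching step of A's loop, seen through the virtual counter k (i = min k n1, j = min k n2)
theorem pvALoop_step_nomatch (a b : List String) (k : Nat) (diffs : List (List String × List String))
    (ca cb : List String)
    (hg : k < max a.length b.length)
    (hm : ¬(k < a.length ∧ k < b.length ∧ a.getD k "" = b.getD k "")) :
    pvALoop a b (min k a.length) (min k b.length) diffs ca cb =
    pvALoop a b (min (k+1) a.length) (min (k+1) b.length) diffs
      (ca ++ if k < a.length then [a.getD k ""] else [])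
      (cb ++ if k < b.length then [b.getD k ""] else []) := by
  have hg' : min k a.length < a.length ∨ min k b.length < b.length := by omega
  have hm' : ¬(min k a.length < a.length ∧ min k b.length < b.length ∧
      a.getD (min k a.length) "" = b.getD (min k b.length) "") := by
    intro ⟨h1, h2, h3⟩
    have e1 : min k a.length = k := by omega
    have e2 : min k b.length = k := by omega
    exact hm ⟨by omega, by omega, by rw [e1] at h3; rw [e2] at h3; exact h3⟩
  rw [pvALoop]; rw [dif_pos hg']; rw [dif_neg hm']
  have ei : (if min k a.length < a.length then min k a.length + 1 else min k a.length)
      = min (k+1) a.length := by split <;> omega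
  have ej : (if min k b.length < b.length then min k b.length + 1 else min k b.length)
      = min (k+1) b.length := by split <;> omega
  have eca : (if min k a.length < a.length then ca ++ [a.getD (min k a.length) ""] else ca)
      = ca ++ (if k < a.length then [a.getD k ""] else []) := by
    by_cases h1 : k < a.length
    · have e : min k a.length = k := by omega
      simp [e, h1]
    · have h2 : ¬ (min k a.length < a.length) := by omega
      simp [h1, h2]
  have ecb : (if min k b.length < b.length then cb ++ [b.getD (min k b.length) ""] else cb)
      = cb ++ (if k < b.length then [b.getD k ""] else []) := by
    by_cases h1 : k < b.length
    · have e : min k b.length = k := by omega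
      simp [e, h1]
    · have h2 : ¬ (min k b.length < b.length) := by omega
      simp [h1, h2]
  rw [ei, ej, eca, ecb]

-- prepending one element of a run to the tail slice of the run
theorem pvSegShift (l : List String) (k e : Nat) (hke : k + 1 ≤ e) :
    (if k < l.length then [l.getD k ""] else []) ++ (l.drop (k+1)).take (min e l.length - (k+1))
    = (l.drop k).take (min e l.length - k) := by
  by_cases h : k < l.length
  · have h2 : min e l.length - k = (min e l.length - (k+1)) + 1 := by omega
    rw [h2, List.drop_eq_getElem_cons h, List.take_succ_cons]
    simp [h, List.getD_eq_getElem?_getD]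
  · have h1 : min e l.length - k = 0 := by omega
    have h2 : min e l.length - (k+1) = 0 := by omega
    simp [h, h1, h2]

-- A's loop traverses a whole non-matching run: accumulators gain the slices of the run
theorem pvALoop_run (a b : List String) :
    ∀ (m k : Nat) (diffs : List (List String × List String)) (ca cb : List String),
    max a.length b.length - k ≤ m →
    pvALoop a b (min k a.length) (min k b.length) diffs ca cb =
    pvALoop a b (min (pvRunEnd a b k) a.length) (min (pvRunEnd a b k) b.length) diffs
      (ca ++ (a.drop k).take (min (pvRunEnd a b k) a.length - k))
      (cb ++ (b.drop k).take (min (pvRunEnd a b k) b.length - k)) := by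
  intro m
  induction m with
  | zero =>
    intro k diffs ca cb h
    have he : pvRunEnd a b k = k := by
      rw [pvRunEnd]; rw [dif_neg]; rintro ⟨h1, _⟩; omega
    rw [he]
    have t1 : min k a.length - k = 0 := by omega
    have t2 : min k b.length - k = 0 := by omega
    simp [t1, t2]
  | succ m ih =>
    intro k diffs ca cb h
    by_cases hrun : k < max a.length b.length ∧
        ¬(k < a.length ∧ k < b.length ∧ a.getD k "" = b.getD k "")
    · obtain ⟨hg, hm⟩ := hrun
      have hstep := pvRunEnd_step a b k hg hm
      have hge : k + 1 ≤ pvRunEnd a b k := hstep ▸ pvRunEnd_ge a b (k+1)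
      rw [pvALoop_step_nomatch a b k diffs ca cb hg hm]
      rw [hstep, ih (k+1) diffs _ _ (by omega)]
      rw [List.append_assoc, List.append_assoc, ← hstep,
        pvSegShift a k (pvRunEnd a b k) hge, pvSegShift b k (pvRunEnd a b k) hge]
    · have he : pvRunEnd a b k = k := by rw [pvRunEnd]; rw [dif_neg hrun]
      rw [he]
      have t1 : min k a.length - k = 0 := by omega
      have t2 : min k b.length - k = 0 := by omega
      simp [t1, t2]

-- main correspondence: from a flushed state, A's loop equals B's loop
theorem pvMain (a b : List String) :
    ∀ (m k : Nat) (diffs : List (List String × List String)),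
    max a.length b.length - k ≤ m →
    pvALoop a b (min k a.length) (min k b.length) diffs [] [] = pvBLoop a b k diffs := by
  intro m
  induction m with
  | zero =>
    intro k diffs h
    rw [pvALoop, pvBLoop]
    rw [dif_neg (by omega : ¬(min k a.length < a.length ∨ min k b.length < b.length))]
    rw [dif_neg (by omega : ¬ k < max a.length b.length)]
    simp
  | succ m ih =>
    intro k diffs h
    by_cases hg : k < max a.length b.length
    · by_cases hm : k < a.length ∧ k < b.length ∧ a.getD k "" = b.getD k ""
      · obtain ⟨h1, h2, h3⟩ := hm
        have e1 : min k a.length = k := by omega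
        have e2 : min k b.length = k := by omega
        rw [pvALoop]
        rw [dif_pos (by omega : min k a.length < a.length ∨ min k b.length < b.length)]
        rw [dif_pos (by rw [e1, e2]; exact ⟨h1, h2, h3⟩)]
        rw [pvBLoop, dif_pos hg, dif_pos ⟨h1, h2, h3⟩]
        have e3 : min k a.length + 1 = min (k+1) a.length := by omega
        have e4 : min k b.length + 1 = min (k+1) b.length := by omega
        rw [e3, e4]
        have : (if ([] : List String) ≠ [] ∨ ([] : List String) ≠ [] then
            diffs ++ [(([] : List String), ([] : List String))] else diffs) = diffs := by simp
        rw [this]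
        exact ih (k+1) diffs (by omega)
      · have hstep := pvRunEnd_step a b k hg hm
        have hge : k + 1 ≤ pvRunEnd a b k := hstep ▸ pvRunEnd_ge a b (k+1)
        have hle : pvRunEnd a b k ≤ max a.length b.length := pvRunEnd_le a b k (by omega)
        have hrun := pvALoop_run a b (max a.length b.length) k diffs [] [] (by omega)
        simp only [List.nil_append] at hrun
        rw [hrun]
        rw [pvBLoop, dif_pos hg, dif_neg hm]
        have hne : (a.drop k).take (min (pvRunEnd a b k) a.length - k) ≠ [] ∨
            (b.drop k).take (min (pvRunEnd a b k) b.length - k) ≠ [] := by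
          by_cases hka : k < a.length
          · left
            apply List.ne_nil_of_length_pos
            simp only [List.length_take, List.length_drop]
            omega
          · right
            have hkb : k < b.length := by omega
            apply List.ne_nil_of_length_pos
            simp only [List.length_take, List.length_drop]
            omega
        by_cases hee : pvRunEnd a b k < max a.length b.length
        · obtain ⟨p1, p2, p3⟩ := pvRunEnd_stop a b k hee
          have e1 : min (pvRunEnd a b k) a.length = pvRunEnd a b k := by omega
          have e2 : min (pvRunEnd a b k) b.length = pvRunEnd a b k := by omega
          rw [pvALoop]
          rw [dif_pos (by omega : min (pvRunEnd a b k) a.length < a.length ∨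
              min (pvRunEnd a b k) b.length < b.length)]
          rw [dif_pos (by rw [e1, e2]; exact ⟨p1, p2, p3⟩)]
          rw [if_pos hne]
          rw [pvBLoop, dif_pos hee, dif_pos ⟨p1, p2, p3⟩]
          have e3 : min (pvRunEnd a b k) a.length + 1 = min (pvRunEnd a b k + 1) a.length := by omega
          have e4 : min (pvRunEnd a b k) b.length + 1 = min (pvRunEnd a b k + 1) b.length := by omega
          rw [e3, e4]
          exact ih (pvRunEnd a b k + 1) _ (by omega)
        · rw [pvALoop]
          rw [dif_neg (by omega : ¬(min (pvRunEnd a b k) a.length < a.length ∨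
              min (pvRunEnd a b k) b.length < b.length))]
          rw [if_pos hne]
          rw [pvBLoop, dif_neg hee]
    · rw [pvALoop, pvBLoop]
      rw [dif_neg (by omega : ¬(min k a.length < a.length ∨ min k b.length < b.length))]
      rw [dif_neg hg]
      simp

-- ===== VERDICT (by name: the statement is the Claim_ definition above) =====
theorem find_all_diff_segments_spec : Claim_equal_find_all_diff_segments := by
  intro a b _
  unfold Spec_find_all_diff_segments find_all_diff_segments find_all_diff_segments_alt
  have := pvMain a b (max a.length b.length) 0 [] (by omega)
  simpa using this
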